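-- pv_equiv track=rewrite | github.com/TaylorTree/statio | statio/core.py | top_values
-- ===== SOURCE A (Python) =====
-- import bisect
--
-- def top_values(values, period=None, num=1):
--     """Returns list of top num items.
--
--     :param values: list of values to iterate and compute stat.
--     :param period: (optional) # of values included in computation.
--         * None - includes all values in computation.
--     :param num: the num in the top num items.
--     :rtype: list of windowed top num items.
--
--     Examples:
--     >>> values = [34, 30, 29, 34, 38, 25, 35]
--     >>> top_values(values, 3, 2)  #3 period window and top 2 items.
--     [[34], [30, 34], [30, 34], [30, 34], [34, 38], [34, 38], [35, 38]]
--     """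
--     if period:
--         if period < 1:
--             raise ValueError("period must be 1 or greater")
--
--         period = int(period)
--
--     if num:
--         num = int(num)
--
--     results = []
--     recs = []
--     _additem = bisect.insort
--     _search = bisect.bisect_left
--
--     for bar, newx in enumerate(values):
--         if period and (bar >= period):
--             item = values[bar - period]
--             idx = _search(recs, item)
--             del recs[idx]
--
--         _additem(recs, newx)
--
--         begidx = num
--         if bar < num - 1:
--             begidx = bar + 1
--
--         lastval = recs[-begidx:]
--
--         results.append(lastval)
--
--     return results
-- ===== SOURCE B (Python) =====
-- def top_values(values, period=None, num=1):
--     """Windowed top-num items, recomputed per position by sorting the window slice."""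
--     if period:
--         if period < 1:
--             raise ValueError("period must be 1 or greater")
--         period = int(period)
--     if num:
--         num = int(num)
--     results = []
--     for i in range(len(values)):
--         lo = i - period + 1 if period and i - period + 1 > 0 else 0
--         window = sorted(values[lo:i + 1])
--         k = i + 1 if i < num - 1 else num
--         results.append(window[-k:])
--     return results
-- ===== Notes on version B (the rewrite author's own statement) =====
-- stated objective: simpler
-- what changed: A maintains an incremental sorted multiset across positions (bisect insort/bisect_left delete); B independently recomputes each position by slicing the window out of the input and sorting it.
import Mathlib
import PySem

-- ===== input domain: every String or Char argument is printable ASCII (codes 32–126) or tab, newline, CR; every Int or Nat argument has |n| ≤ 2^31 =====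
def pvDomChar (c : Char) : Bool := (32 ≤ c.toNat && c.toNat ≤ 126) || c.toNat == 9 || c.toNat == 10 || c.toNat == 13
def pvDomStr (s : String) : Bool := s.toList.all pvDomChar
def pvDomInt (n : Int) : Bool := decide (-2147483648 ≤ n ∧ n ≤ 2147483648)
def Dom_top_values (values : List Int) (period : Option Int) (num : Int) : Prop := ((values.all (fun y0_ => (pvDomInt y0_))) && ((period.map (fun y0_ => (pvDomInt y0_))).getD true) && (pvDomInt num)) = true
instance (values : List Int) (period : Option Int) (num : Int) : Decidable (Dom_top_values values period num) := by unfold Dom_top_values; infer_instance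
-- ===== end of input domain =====

-- ===== PORT A =====
-- B changes the algorithm (per-position slice+sort instead of A's incremental sorted multiset); objective: simpler.
-- bisect.bisect_left ported by its contract on sorted lists (recs is always sorted during A's loop);
-- bisect.insort likewise as sorted insertion after equal elements. int(period)/int(num) are no-ops on ints.
def insortA (x : Int) : List Int → List Int
  | [] => [x]
  | y :: ys => if x < y then x :: y :: ys else y :: insortA x ys

def bisectLeftA (x : Int) : List Int → Nat
  | [] => 0
  | y :: ys => if y < x then bisectLeftA x ys + 1 else 0

-- the loop 'for bar, newx in enumerate(values)' with state (recs); results built per iteration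
def loopA (values : List Int) (period : Option Int) (num : Int) : List Int → Nat → List Int → List (List Int)
  | [], _, _ => []
  | newx :: rest, bar, recs =>
    let recs1 :=
      match period with
      | some p =>
        if p ≠ 0 ∧ p ≤ (bar : Int) then
          -- item = values[bar - period]; the index is always in range here (0 ≤ bar-period < len values)
          let item := PySem.List.pyGetD values ((bar : Int) - p) 0
          recs.eraseIdx (bisectLeftA item recs)
        else recs
      | none => recs
    let recs2 := insortA newx recs1
    let begidx : Int := if (bar : Int) < num - 1 then (bar : Int) + 1 else num
    let lastval := PySem.List.slice recs2 (some (-begidx)) none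
    lastval :: loopA values period num rest (bar + 1) recs2

def top_values (values : List Int) (period : Option Int) (num : Int) : List (List Int) :=
  loopA values period num values 0 []

-- ===== PORT B =====
def top_values_alt (values : List Int) (period : Option Int) (num : Int) : List (List Int) :=
  (List.range values.length).map (fun (i : Nat) =>
    let lo : Int :=
      match period with
      | some p => if p ≠ 0 ∧ (i : Int) - p + 1 > 0 then (i : Int) - p + 1 else 0
      | none => 0
    let window := PySem.List.sorted (PySem.List.slice values (some lo) (some ((i : Int) + 1))) (fun x => x) false
    let k : Int := if (i : Int) < num - 1 then (i : Int) + 1 else num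
    PySem.List.slice window (some (-k)) none)

-- ===== PRECONDITION & SPEC =====
-- Pre_ excludes exactly the inputs where A raises ValueError: a truthy period below 1 (negative period).
def Pre_top_values (values : List Int) (period : Option Int) (num : Int) : Prop := 0 ≤ period.getD 0
instance (values : List Int) (period : Option Int) (num : Int) : Decidable (Pre_top_values values period num) := by unfold Pre_top_values; infer_instance
def pvWitness_top_values : List Int × Option Int × Int := ([34, 30, 29, 34, 38, 25, 35], some 3, 2)
def Spec_top_values (values : List Int) (period : Option Int) (num : Int) (out : List (List Int)) : Prop := out = top_values_alt values period num
instance (values : List Int) (period : Option Int) (num : Int) (out : List (List Int)) : Decidable (Spec_top_values values period num out) := by unfold Spec_top_values; infer_instance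

-- ===== CLAIM (what is proved, stated in full; the proofs are below) =====
def Claim_equal_top_values : Prop := ∀ (values : List Int) (period : Option Int) (num : Int), Dom_top_values values period num → Pre_top_values values period num → Spec_top_values values period num (top_values values period num)

-- ===== LEMMAS AND PROOFS =====
theorem insortA_perm (x : Int) (xs : List Int) : (insortA x xs).Perm (x :: xs) := by
  induction xs with
  | nil => simp [insortA]
  | cons y ys ih =>
    simp only [insortA]
    split
    · exact List.Perm.refl _
    · exact (ih.cons y).trans (List.Perm.swap x y ys)

theorem mem_insortA {z x : Int} {xs : List Int} (h : z ∈ insortA x xs) : z = x ∨ z ∈ xs := by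
  have := (insortA_perm x xs).mem_iff.mp h
  simpa using this

theorem insortA_sorted (x : Int) (xs : List Int) (h : xs.Pairwise (· ≤ ·)) :
    (insortA x xs).Pairwise (· ≤ ·) := by
  induction xs with
  | nil => simp [insortA]
  | cons y ys ih =>
    simp only [insortA]
    rcases List.pairwise_cons.mp h with ⟨hy, hys⟩
    split
    · rename_i hlt
      refine List.pairwise_cons.mpr ⟨?_, h⟩
      intro z hz
      rcases List.mem_cons.mp hz with rfl | hz
      · exact le_of_lt hlt
      · exact le_trans (le_of_lt hlt) (hy z hz)
    · rename_i hnlt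
      refine List.pairwise_cons.mpr ⟨?_, ih hys⟩
      intro z hz
      rcases mem_insortA hz with rfl | hz
      · omega
      · exact hy z hz

theorem eraseIdx_bisectLeftA (x : Int) (xs : List Int) (hs : xs.Pairwise (· ≤ ·)) (hm : x ∈ xs) :
    xs.eraseIdx (bisectLeftA x xs) = xs.erase x := by
  induction xs with
  | nil => cases hm
  | cons y ys ih =>
    rcases List.pairwise_cons.mp hs with ⟨hy, hys⟩
    simp only [bisectLeftA]
    split
    · rename_i hlt
      have hne : x ≠ y := by omega
      have hmem : x ∈ ys := by
        rcases List.mem_cons.mp hm with rfl | h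
        · omega
        · exact h
      rw [List.eraseIdx_cons_succ, List.erase_cons_tail (by simpa using hne.symm) ]
      rw [ih hys hmem]
    · rename_i hnlt
      have hxy : y = x := by
        rcases List.mem_cons.mp hm with rfl | h
        · rfl
        · have := hy x h; omega
      subst hxy
      simp [List.erase_cons_head]

-- the window of already-processed values, as a function of the prefix:
-- unbounded (period falsy) it is the whole prefix; with window size q ≥ 1 its last q elements
def wndW (q : Nat) (pre : List Int) : List Int := pre.drop (pre.length - q)

-- B's per-position output
def fB (values : List Int) (period : Option Int) (num : Int) (i : Nat) : List Int :=
    let lo : Int :=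
      match period with
      | some p => if p ≠ 0 ∧ (i : Int) - p + 1 > 0 then (i : Int) - p + 1 else 0
      | none => 0
    let window := PySem.List.sorted (PySem.List.slice values (some lo) (some ((i : Int) + 1))) (fun x => x) false
    let k : Int := if (i : Int) < num - 1 then (i : Int) + 1 else num
    PySem.List.slice window (some (-k)) none

theorem alt_eq_map_fB (values : List Int) (period : Option Int) (num : Int) :
    top_values_alt values period num = (List.range values.length).map (fB values period num) := by
  unfold top_values_alt fB
  rfl

theorem sorted_eq_of_perm_sorted (xs ys : List Int) (hp : ys.Perm xs) (hs : ys.Pairwise (· ≤ ·)) :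
    PySem.List.sorted xs (fun x => x) false = ys :=
  PySem.List.sorted_id_eq_of_perm_of_pairwise xs ys hp hs

-- take of the prefix
theorem take_pre (pre rest : List Int) (x : Int) :
    ((pre ++ x :: rest).take (pre.length + 1)) = pre ++ [x] := by
  rw [List.take_append]
  simp

-- period = some 0 behaves exactly like period = none (both falsy in Python)
theorem loopA_zero (values : List Int) (num : Int) :
    ∀ (rest : List Int) (bar : Nat) (recs : List Int),
      loopA values (some 0) num rest bar recs = loopA values none num rest bar recs := by
  intro rest
  induction rest with
  | nil => intro bar recs; simp [loopA]
  | cons x r ih =>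
    intro bar recs
    simp only [loopA]
    rw [if_neg (by simp)]
    rw [List.cons.injEq]
    exact ⟨rfl, ih _ _⟩

theorem fB_zero (values : List Int) (num : Int) (i : Nat) :
    fB values (some 0) num i = fB values none num i := by
  simp [fB]

-- main invariant lemma, unbounded case (period = none)
theorem loopA_none (values : List Int) (num : Int) :
    ∀ (rest pre recs : List Int), values = pre ++ rest →
      recs.Pairwise (· ≤ ·) → recs.Perm pre →
      loopA values none num rest pre.length recs
        = (List.range' pre.length rest.length).map (fB values none num) := by
  intro rest
  induction rest with
  | nil => intro pre recs _ _ _; simp [loopA]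
  | cons newx rest ih =>
    intro pre recs hv hs hp
    have hs2 : (insortA newx recs).Pairwise (· ≤ ·) := insortA_sorted newx recs hs
    have hp2 : (insortA newx recs).Perm (pre ++ [newx]) := by
      refine (insortA_perm newx recs).trans ?_
      refine (hp.cons newx).trans ?_
      simpa using (List.perm_append_singleton newx pre).symm
    have hslice : PySem.List.slice values (some 0) (some ((pre.length : Int) + 1)) = pre ++ [newx] := by
      have h1 : PySem.List.slice values (some ((0:Nat) : Int)) (some (((pre.length + 1 : Nat)) : Int))
          = (values.drop 0).take (pre.length + 1 - 0) := PySem.List.slice_natCast values 0 (pre.length + 1)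
      have : values.take (pre.length + 1) = pre ++ [newx] := by
        rw [hv]; exact take_pre pre rest newx
      simpa [this] using h1
    have hfb : fB values none num pre.length
        = PySem.List.slice (insortA newx recs)
            (some (-(if (pre.length : Int) < num - 1 then (pre.length : Int) + 1 else num))) none := by
      simp only [fB, hslice]
      rw [sorted_eq_of_perm_sorted _ _ hp2 hs2]
    have hv' : values = (pre ++ [newx]) ++ rest := by simpa [List.append_assoc] using hv
    have ih2 := ih (pre ++ [newx]) (insortA newx recs) hv' hs2 (by simpa using hp2)
    have hlen : (pre ++ [newx]).length = pre.length + 1 := by simp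
    rw [hlen] at ih2
    simp only [loopA]
    rw [List.length_cons, List.range'_succ, List.map_cons, List.cons.injEq]
    exact ⟨hfb.symm, ih2⟩

-- main invariant lemma, windowed case (period = some p, 1 ≤ p)
theorem loopA_some (values : List Int) (num : Int) (p : Int) (hp1 : 1 ≤ p) :
    ∀ (rest pre recs : List Int), values = pre ++ rest →
      recs.Pairwise (· ≤ ·) → recs.Perm (wndW p.toNat pre) →
      loopA values (some p) num rest pre.length recs
        = (List.range' pre.length rest.length).map (fB values (some p) num) := by
  intro rest
  induction rest with
  | nil => intro pre recs _ _ _; simp [loopA]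
  | cons newx rest ihh =>
    intro pre recs hv hs hperm
    set q : Nat := p.toNat with hq
    have hq1 : 1 ≤ q := by omega
    set bar : Nat := pre.length with hbar
    by_cases hge : p ≤ (bar : Int)
    case pos =>
      -- deletion fires
      have hqbar : q ≤ bar := by omega
      have hlen : bar - q < values.length := by
        have : values.length = bar + 1 + rest.length := by rw [hv]; simp [hbar]; omega
        omega
      have hitem : PySem.List.pyGetD values ((bar : Int) - p) 0 = values[bar - q] := by
        rw [show ((bar : Int) - p) = ((bar - q : Nat) : Int) from by omega, PySem.List.pyGetD_natCast]
        exact List.getD_eq_getElem values 0 hlen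
      have hdl : bar - q < pre.length := by omega
      have hW : wndW q pre = pre[bar - q] :: pre.drop (bar - q + 1) := by
        unfold wndW
        conv_lhs => rw [show pre.length - q = bar - q from by omega]
        exact List.drop_eq_getElem_cons hdl
      have hitem2 : values[bar - q] = pre[bar - q] := by
        rw [List.getElem_of_eq hv]
        exact List.getElem_append_left hdl
      have hmem : values[bar - q] ∈ recs := by
        rw [hperm.mem_iff, hW, hitem2]; exact List.mem_cons_self
      have herase : recs.eraseIdx (bisectLeftA values[bar - q] recs) = recs.erase values[bar - q] :=
        eraseIdx_bisectLeftA _ _ hs hmem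
      have hs1 : (recs.erase values[bar - q]).Pairwise (· ≤ ·) :=
        hs.sublist (List.erase_sublist)
      have hp1' : (recs.erase values[bar - q]).Perm (pre.drop (bar - q + 1)) := by
        have h := hperm.erase values[bar - q]
        rw [hW] at h
        rw [hitem2] at h ⊢
        rwa [List.erase_cons_head] at h
      have hs2 : (insortA newx (recs.erase values[bar - q])).Pairwise (· ≤ ·) :=
        insortA_sorted _ _ hs1
      have hp2 : (insortA newx (recs.erase values[bar - q])).Perm (pre.drop (bar - q + 1) ++ [newx]) := by
        refine (insortA_perm _ _).trans ?_
        refine ((hp1'.cons newx)).trans ?_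
        simpa using (List.perm_append_singleton newx _).symm
      have hWnew : wndW q (pre ++ [newx]) = pre.drop (bar - q + 1) ++ [newx] := by
        unfold wndW
        rw [show (pre ++ [newx]).length - q = bar - q + 1 from by simp [hbar]; omega,
          List.drop_append_of_le_length (by omega)]
      have htake : values.take (bar + 1) = pre ++ [newx] := by
        rw [hv]; exact take_pre pre rest newx
      have hslice : PySem.List.slice values (some ((bar : Int) - p + 1)) (some ((bar : Int) + 1))
          = pre.drop (bar - q + 1) ++ [newx] := by
        have h1 := PySem.List.slice_natCast values (bar - q + 1) (bar + 1)
        rw [show ((bar - q + 1 : Nat) : Int) = (bar : Int) - p + 1 from by omega,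
          show ((bar + 1 : Nat) : Int) = (bar : Int) + 1 from by omega] at h1
        rw [h1]
        have h2 : (values.take (bar + 1)).drop (bar - q + 1)
            = (values.drop (bar - q + 1)).take (bar + 1 - (bar - q + 1)) := List.drop_take
        rw [← h2, htake, List.drop_append_of_le_length (by omega)]
      have hfb : fB values (some p) num bar
          = PySem.List.slice (insortA newx (recs.erase values[bar - q]))
              (some (-(if (bar : Int) < num - 1 then (bar : Int) + 1 else num))) none := by
        simp only [fB]
        rw [if_pos ⟨by omega, by omega⟩, hslice, sorted_eq_of_perm_sorted _ _ hp2 hs2]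
      have hv' : values = (pre ++ [newx]) ++ rest := by simpa [List.append_assoc] using hv
      have ih2 := ihh (pre ++ [newx]) (insortA newx (recs.erase values[bar - q])) hv' hs2
        (by rw [hWnew]; exact hp2)
      have hlen2 : (pre ++ [newx]).length = bar + 1 := by simp [hbar]
      rw [hlen2] at ih2
      simp only [loopA]
      rw [if_pos ⟨by omega, hge⟩]
      simp only [hitem, herase]
      rw [List.length_cons, List.range'_succ, List.map_cons, List.cons.injEq]
      exact ⟨hfb.symm, ih2⟩
    case neg =>
      -- bar < p : no deletion yet, window is the whole prefix
      have hblt : bar < q := by omega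
      have hWold : wndW q pre = pre := by
        unfold wndW
        rw [show pre.length - q = 0 from by omega, List.drop_zero]
      rw [hWold] at hperm
      have hs2 : (insortA newx recs).Pairwise (· ≤ ·) := insortA_sorted newx recs hs
      have hp2 : (insortA newx recs).Perm (pre ++ [newx]) := by
        refine (insortA_perm newx recs).trans ?_
        refine (hperm.cons newx).trans ?_
        simpa using (List.perm_append_singleton newx pre).symm
      have hWnew : wndW q (pre ++ [newx]) = pre ++ [newx] := by
        unfold wndW
        rw [show (pre ++ [newx]).length - q = 0 from by simp; omega, List.drop_zero]
      have htake : values.take (bar + 1) = pre ++ [newx] := by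
        rw [hv]; exact take_pre pre rest newx
      have hslice : PySem.List.slice values (some 0) (some ((bar : Int) + 1)) = pre ++ [newx] := by
        have h1 := PySem.List.slice_natCast values 0 (bar + 1)
        rw [show ((bar + 1 : Nat) : Int) = (bar : Int) + 1 from by omega,
          show ((0 : Nat) : Int) = (0 : Int) from rfl] at h1
        rw [h1]
        simpa using htake
      have hfb : fB values (some p) num bar
          = PySem.List.slice (insortA newx recs)
              (some (-(if (bar : Int) < num - 1 then (bar : Int) + 1 else num))) none := by
        simp only [fB]
        rw [if_neg (by omega), hslice, sorted_eq_of_perm_sorted _ _ hp2 hs2]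
      have hv' : values = (pre ++ [newx]) ++ rest := by simpa [List.append_assoc] using hv
      have ih2 := ihh (pre ++ [newx]) (insortA newx recs) hv' hs2 (by rw [hWnew]; exact hp2)
      have hlen2 : (pre ++ [newx]).length = bar + 1 := by simp [hbar]
      rw [hlen2] at ih2
      simp only [loopA]
      rw [if_neg (by intro h; exact hge h.2)]
      rw [List.length_cons, List.range'_succ, List.map_cons, List.cons.injEq]
      exact ⟨hfb.symm, ih2⟩

-- ===== VERDICT (by name: the statement is the Claim_ definition above) =====
theorem top_values_spec : Claim_equal_top_values := by
  intro values period num _hdom hpre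
  unfold Spec_top_values
  rw [alt_eq_map_fB, List.range_eq_range']
  show loopA values period num values 0 [] = _
  have h0 : values = ([] : List Int) ++ values := rfl
  rcases period with _ | p
  · have := loopA_none values num values [] [] h0 (by simp) (by simp)
    simpa [List.range_eq_range'] using this
  · unfold Pre_top_values at hpre
    simp only [Option.getD_some] at hpre
    by_cases hp0 : p = 0
    · subst hp0
      have := loopA_none values num values [] [] h0 (by simp) (by simp)
      rw [loopA_zero,
        show fB values (some 0) num = fB values none num from funext fun i => fB_zero values num i]
      simpa [List.range_eq_range'] using this
    · have hp1 : 1 ≤ p := by omega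
      have := loopA_some values num p hp1 values [] [] h0 (by simp) (by simp [wndW])
      simpa [List.range_eq_range'] using this
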